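-- pv_equiv track=rewrite | github.com/bog-walk/project-euler-python | solution/batch7/problem72.py | generate_all_farey_lengths
-- ===== SOURCE A (Python) =====
-- def generate_all_farey_lengths(limit: int) -> list[int]:
--     """
--     Solution still uses a sieve, as in the above solution, but the sieve
--     calculates the totient of all k multiples of primes <= [limit] based on the
--     following:
--
--     current Phi(p_k) = previous Phi(p_k) * (1 - (1/p))
--
--     current Phi(p_k) = previous Phi(p_k) - previous Phi(p_k)/p
--
--     Then the size of each sequence order is cached based on:
--
--     F(n).length = F(n-1).length + phi(n)
--
--     SPEED (BETTER)
--         1.28s for N = 1e6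
--
--     :returns: List of Farey sequence lengths for every index = order N.
--     """
--
--     phi_cache = list(range(limit + 1))
--     for n in range(2, limit + 1):
--         if phi_cache[n] == n:  # n is prime
--             # calculate Phi of all multiples of n
--             for k in range(n, limit + 1, n):
--                 phi_cache[k] -= phi_cache[k] // n
--     counts = [0]*(limit+1)
--     # if returning only a single count instead of a generated list of counts, use
--     # return sum(phi_cache[2:])
--     for n in range(2, limit + 1):
--         counts[n] = counts[n-1] + phi_cache[n]
--     return counts
-- ===== SOURCE B (Python) =====
-- def generate_all_farey_lengths(limit: int) -> list[int]:
--     """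
--     Divisor-sum sieve: instead of the prime sieve multiplying by (1 - 1/p),
--     use the identity sum_{d | n} phi(d) = n.  Start phi[n] = n and, for each
--     n in increasing order, subtract the (already final) phi[n] from every
--     proper multiple of n; when n is reached all of its proper divisors have
--     been subtracted, so phi[n] is Euler's totient of n.  Farey lengths are
--     then emitted as one running accumulation.
--     """
--     phi = list(range(limit + 1))
--     for n in range(1, limit + 1):
--         shared = phi[n]
--         for k in range(2 * n, limit + 1, n):
--             phi[k] -= shared
--     acc = 0
--     counts = []
--     for idx, v in enumerate(phi):
--         if idx > 1:
--             acc += v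
--         counts.append(acc)
--     return counts
-- ===== Notes on version B (the rewrite author's own statement) =====
-- stated objective: alternative
-- what changed: Replaces the prime sieve (subtract phi[k]//p across multiples of each prime, guarded by a primality test) with a divisor-sum sieve based on sum_{d|n} phi(d) = n that subtracts the finished phi[n] from every proper multiple of every n, and emits the Farey lengths by a running accumulation over the phi list instead of writing into a preallocated zero array.
import Mathlib
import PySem

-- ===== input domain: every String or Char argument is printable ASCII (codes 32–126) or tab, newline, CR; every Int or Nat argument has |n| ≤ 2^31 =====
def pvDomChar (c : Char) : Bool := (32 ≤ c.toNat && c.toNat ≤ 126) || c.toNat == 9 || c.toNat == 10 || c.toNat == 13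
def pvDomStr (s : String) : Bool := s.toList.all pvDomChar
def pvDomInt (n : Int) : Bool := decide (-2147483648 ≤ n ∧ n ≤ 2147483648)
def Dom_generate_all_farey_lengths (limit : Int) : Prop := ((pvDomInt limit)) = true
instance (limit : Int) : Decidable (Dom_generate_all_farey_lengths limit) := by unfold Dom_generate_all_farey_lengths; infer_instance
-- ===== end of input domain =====

-- B replaces A's prime sieve (phi[k] -= phi[k]//p over multiples of each prime, under a
-- primality test) with a divisor-sum sieve (phi[k] -= phi[n] over proper multiples of
-- every n, via sum_{d|n} phi(d) = n) and emits the Farey lengths by a running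
-- accumulation instead of writing into a preallocated zero array; B is not faster.

-- ===== PORT A =====
-- all list indices A uses are provably in range, so the total forms pyGetD/pySetD are exact
def sieveStepA (limit : Int) (phi : List Int) (n : Int) : List Int :=
  if PySem.List.pyGetD phi n 0 == n then
    (PySem.List.pyRange n (limit + 1) n).foldl (fun a k =>
      PySem.List.pySetD a k
        (PySem.List.pyGetD a k 0 - PySem.Int.floordiv (PySem.List.pyGetD a k 0) n)) phi
  else phi

def countStepA (phi : List Int) (c : List Int) (n : Int) : List Int :=
  PySem.List.pySetD c n (PySem.List.pyGetD c (n - 1) 0 + PySem.List.pyGetD phi n 0)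

def generate_all_farey_lengths (limit : Int) : List Int :=
  let phi := (PySem.List.pyRange 2 (limit + 1) 1).foldl (sieveStepA limit)
      (PySem.List.pyRange 0 (limit + 1) 1)
  (PySem.List.pyRange 2 (limit + 1) 1).foldl (countStepA phi)
      (List.replicate (limit + 1).toNat 0)

-- ===== PORT B =====
def sieveStepB (limit : Int) (phi : List Int) (n : Int) : List Int :=
  let shared := PySem.List.pyGetD phi n 0
  (PySem.List.pyRange (2 * n) (limit + 1) n).foldl (fun a k =>
    PySem.List.pySetD a k (PySem.List.pyGetD a k 0 - shared)) phi

def accStepB (st : Int × List Int) (iv : Int × Int) : Int × List Int :=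
  let acc := if 1 < iv.1 then st.1 + iv.2 else st.1
  (acc, st.2 ++ [acc])

def generate_all_farey_lengths_alt (limit : Int) : List Int :=
  let phi := (PySem.List.pyRange 1 (limit + 1) 1).foldl (sieveStepB limit)
      (PySem.List.pyRange 0 (limit + 1) 1)
  ((PySem.List.enumerate phi 0).foldl accStepB ((0 : Int), ([] : List Int))).2

-- ===== PRECONDITION & SPEC =====
def Spec_generate_all_farey_lengths (limit : Int) (out : List Int) : Prop := out = generate_all_farey_lengths_alt limit
instance (limit : Int) (out : List Int) : Decidable (Spec_generate_all_farey_lengths limit out) := by unfold Spec_generate_all_farey_lengths; infer_instance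

-- ===== CLAIM (what is proved, stated in full; the proofs are below) =====
def Claim_equal_generate_all_farey_lengths : Prop := ∀ (limit : Int), Dom_generate_all_farey_lengths limit → Spec_generate_all_farey_lengths limit (generate_all_farey_lengths limit)

-- ===== LEMMAS AND PROOFS =====

-- ---------- generic: a fold writing f(current value) at pairwise-distinct in-range indices ----------
theorem foldl_pySetD_spec (f : Int → Int) :
    ∀ (ks : List Int) (arr : List Int), ks.Nodup →
      (∀ k ∈ ks, 0 ≤ k ∧ k < (arr.length : Int)) →
      (ks.foldl (fun a k => PySem.List.pySetD a k (f (PySem.List.pyGetD a k 0))) arr)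
        = (List.range arr.length).map
            (fun (j : Nat) => if ((j : Int) ∈ ks) then f (arr.getD j 0) else arr.getD j 0) := by
  intro ks
  induction ks with
  | nil =>
      intro arr _ _
      simp only [List.foldl_nil, List.not_mem_nil, if_false]
      apply List.ext_getElem (by simp)
      intro i h1 h2
      simp [List.getD_eq_getElem?_getD, List.getElem?_eq_getElem h1]
  | cons k ks ih =>
      intro arr hnd hin
      have hk := hin k (by simp)
      have hknn : 0 ≤ k := hk.1
      have hklt : k.toNat < arr.length := by omega
      have hkeq : ((k.toNat : Nat) : Int) = k := by omega
      rw [List.foldl_cons]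
      have hget : PySem.List.pyGetD arr k 0 = arr.getD k.toNat 0 := by
        conv_lhs => rw [← hkeq]
        rw [PySem.List.pyGetD_natCast]
      have harr' : (PySem.List.pySetD arr k (f (PySem.List.pyGetD arr k 0)))
          = arr.set k.toNat (f (arr.getD k.toNat 0)) := by
        rw [hget, PySem.List.pySetD_of_nonneg arr _ hknn]
      rw [harr', ih _ (List.Nodup.of_cons hnd) (by
        intro x hx
        have := hin x (by simp [hx])
        simpa [List.length_set] using this)]
      have hlen : (arr.set k.toNat (f (arr.getD k.toNat 0))).length = arr.length := by simp
      rw [hlen]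
      apply List.map_congr_left
      intro j hj
      have hjN : j < arr.length := List.mem_range.mp hj
      have hknotmem : k ∉ ks := (List.nodup_cons.mp hnd).1
      by_cases hjk : (j : Int) = k
      · have hjk' : j = k.toNat := by omega
        have hjnot : (j : Int) ∉ ks := by rw [hjk]; exact hknotmem
        rw [if_neg hjnot]
        have h1 : (arr.set k.toNat (f (arr.getD k.toNat 0))).getD j 0 = f (arr.getD k.toNat 0) := by
          subst hjk'
          simp [List.getD_eq_getElem?_getD, hklt]
        rw [h1, if_pos (by simp [hjk]), hjk']
      · have hset : (arr.set k.toNat (f (arr.getD k.toNat 0))).getD j 0 = arr.getD j 0 := by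
          have hne : k.toNat ≠ j := by omega
          simp [List.getD_eq_getElem?_getD, List.getElem?_set_ne hne]
        rw [hset]
        by_cases hmem : (j : Int) ∈ ks <;> simp [hmem, hjk]

theorem nodup_pyRange_pos (a b s : Int) (hs : 0 < s) : (PySem.List.pyRange a b s).Nodup := by
  rw [PySem.List.pyRange_of_pos a b hs]
  refine List.nodup_range.map ?_
  intro x y h
  have h2 : s * (x : Int) = s * (y : Int) := by
    have := h
    simp only at this
    linarith
  have h3 : (x : Int) = (y : Int) := mul_left_cancel₀ (ne_of_gt hs) h2
  exact_mod_cast h3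

theorem set_map_range {f : Nat → Int} {N x : Nat} (v : Int) (_hx : x < N) :
    ((List.range N).map f).set x v = (List.range N).map (fun j => if j = x then v else f j) := by
  apply List.ext_getElem (by simp)
  intro i h1 h2
  simp only [List.getElem_set, List.getElem_map, List.getElem_range]
  by_cases h : x = i
  · simp [h]
  · have h' : ¬ i = x := fun hh => h hh.symm
    simp [h, h']

-- ---------- A-side model: phi after processing primes ≤ n ----------
def Sset (n k : Nat) : Finset Nat := k.primeFactors.filter (fun p => p ≤ n)
def phiA (n k : Nat) : Nat := (k / ∏ p ∈ Sset n k, p) * ∏ p ∈ Sset n k, (p - 1)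

theorem Sset_prod_dvd (n k : Nat) : ∏ p ∈ Sset n k, p ∣ k :=
  dvd_trans (Finset.prod_dvd_prod_of_subset _ _ _ (Finset.filter_subset _ _))
    (Nat.prod_primeFactors_dvd k)

theorem Sset_prime (n k p : Nat) (h : p ∈ Sset n k) : p.Prime :=
  Nat.prime_of_mem_primeFactors (Finset.mem_filter.mp h).1

theorem Sset_prod_pos (n k : Nat) : 0 < ∏ p ∈ Sset n k, p :=
  Finset.prod_pos (fun p hp => (Sset_prime n k p hp).pos)

theorem phiA_one (k : Nat) : phiA 1 k = k := by
  have h : Sset 1 k = ∅ := by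
    apply Finset.filter_eq_empty_iff.mpr
    intro p hp
    have := (Nat.prime_of_mem_primeFactors hp).two_le
    omega
  simp [phiA, h]

theorem phiA_stable (n k : Nat) (hx : (n + 1) ∉ k.primeFactors) : phiA (n + 1) k = phiA n k := by
  have h : Sset (n + 1) k = Sset n k := by
    apply Finset.ext
    intro p
    simp only [Sset, Finset.mem_filter]
    constructor
    · rintro ⟨h1, h2⟩
      refine ⟨h1, ?_⟩
      rcases Nat.lt_or_ge p (n + 1) with h3 | h3
      · omega
      · exfalso; have : p = n + 1 := by omega
        exact hx (this ▸ h1)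
    · rintro ⟨h1, h2⟩; exact ⟨h1, by omega⟩
  simp [phiA, h]

theorem phiA_step (n k : Nat) (hp : (n + 1).Prime) (hd : (n + 1) ∣ k) (hk : k ≠ 0) :
    phiA (n + 1) k = phiA n k - phiA n k / (n + 1) := by
  set x := n + 1 with hxdef
  have hxmem : x ∈ k.primeFactors := Nat.mem_primeFactors.mpr ⟨hp, hd, hk⟩
  have hxnot : x ∉ Sset n k := by
    simp only [Sset, Finset.mem_filter]
    rintro ⟨-, h⟩; omega
  have hSins : Sset x k = insert x (Sset n k) := by
    apply Finset.ext
    intro p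
    simp only [Sset, Finset.mem_filter, Finset.mem_insert]
    constructor
    · rintro ⟨h1, h2⟩
      rcases Nat.lt_or_ge p x with h3 | h3
      · exact Or.inr ⟨h1, by omega⟩
      · exact Or.inl (by omega)
    · rintro (rfl | ⟨h1, h2⟩)
      · exact ⟨hxmem, le_refl _⟩
      · exact ⟨h1, by omega⟩
  set P := ∏ p ∈ Sset n k, p with hPdef
  set Q := ∏ p ∈ Sset n k, (p - 1) with hQdef
  have hPd : P ∣ k := Sset_prod_dvd n k
  have hPpos : 0 < P := Sset_prod_pos n k
  have hcop : x.Coprime P := by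
    apply Nat.Coprime.prod_right
    intro p hpS
    have hpprime := Sset_prime n k p hpS
    have hple : p ≤ n := (Finset.mem_filter.mp hpS).2
    exact (Nat.coprime_primes hp hpprime).mpr (by omega)
  have hxP : x * P ∣ k := hcop.mul_dvd_of_dvd_of_dvd hd hPd
  set m := k / (x * P) with hmdef
  have hkm : k = x * P * m := (Nat.mul_div_cancel' hxP).symm
  have hPQ : ∏ p ∈ Sset x k, p = x * P := by rw [hSins, Finset.prod_insert hxnot]
  have hQQ : ∏ p ∈ Sset x k, (p - 1) = (x - 1) * Q := by rw [hSins, Finset.prod_insert hxnot]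
  have hkP : k / P = x * m := by
    rw [hkm]
    have : x * P * m = P * (x * m) := by ring
    rw [this, Nat.mul_div_cancel_left _ hPpos]
  have hkxP : k / (x * P) = m := hmdef.symm
  have hphin : phiA n k = x * m * Q := by rw [phiA, ← hPdef, ← hQdef, hkP]
  have hdiv : phiA n k / x = m * Q := by
    rw [hphin]
    have : x * m * Q = x * (m * Q) := by ring
    rw [this, Nat.mul_div_cancel_left _ hp.pos]
  rw [hdiv, hphin, phiA, hPQ, hQQ, hkxP]
  calc m * ((x - 1) * Q) = (x - 1) * (m * Q) := by ring
  _ = x * (m * Q) - m * Q := Nat.sub_one_mul x (m * Q)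
  _ = x * m * Q - m * Q := by rw [mul_assoc]

theorem phiA_final (n k : Nat) (h : ∀ p ∈ k.primeFactors, p ≤ n) : phiA n k = k.totient := by
  have hS : Sset n k = k.primeFactors := Finset.filter_eq_self.mpr h
  set P := ∏ p ∈ k.primeFactors, p with hPdef
  set Q := ∏ p ∈ k.primeFactors, (p - 1) with hQdef
  have hPd : P ∣ k := Nat.prod_primeFactors_dvd k
  have hPpos : 0 < P := Finset.prod_pos (fun p hp => (Nat.prime_of_mem_primeFactors hp).pos)
  have htot : k.totient * P = k * Q := Nat.totient_mul_prod_primeFactors k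
  have hk : k = P * (k / P) := (Nat.mul_div_cancel' hPd).symm
  have h2 : P * k.totient = P * ((k / P) * Q) := by
    calc P * k.totient = k.totient * P := by ring
    _ = k * Q := htot
    _ = P * (k / P) * Q := by rw [← hk]
    _ = P * ((k / P) * Q) := by ring
  have := Nat.eq_of_mul_eq_mul_left hPpos h2
  rw [phiA, hS, ← hPdef, ← hQdef, ← this]

theorem phiA_prime_test (x : Nat) (h2 : 2 ≤ x) : (phiA (x - 1) x = x) ↔ x.Prime := by
  constructor
  · intro heq
    by_contra hnp
    have hx0 : x ≠ 0 := by omega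
    set p := x.minFac with hpdef
    have hpp : p.Prime := Nat.minFac_prime (by omega)
    have hpd : p ∣ x := Nat.minFac_dvd x
    have hpx : p ≠ x := by
      intro h
      exact hnp (h ▸ hpp)
    have hple : p ≤ x := Nat.le_of_dvd (by omega) hpd
    have hS : p ∈ Sset (x - 1) x := by
      simp only [Sset, Finset.mem_filter]
      exact ⟨Nat.mem_primeFactors.mpr ⟨hpp, hpd, hx0⟩, by omega⟩
    set P := ∏ q ∈ Sset (x - 1) x, q with hPdef
    set Q := ∏ q ∈ Sset (x - 1) x, (q - 1) with hQdef
    have hQP : Q < P := by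
      apply Finset.prod_lt_prod_of_nonempty
      · intro i hi; have := (Sset_prime _ _ i hi).two_le; omega
      · intro i hi; have := (Sset_prime _ _ i hi).two_le; omega
      · exact ⟨p, hS⟩
    have hPdvd : P ∣ x := Sset_prod_dvd _ x
    have hPpos : 0 < P := Sset_prod_pos _ x
    have hxP : 0 < x / P := Nat.div_pos (Nat.le_of_dvd (by omega) hPdvd) hPpos
    have hlt : phiA (x - 1) x < x := by
      calc phiA (x - 1) x = (x / P) * Q := by rw [phiA, ← hPdef, ← hQdef]
      _ < (x / P) * P := by exact mul_lt_mul_of_pos_left hQP hxP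
      _ = x := Nat.div_mul_cancel hPdvd
    omega
  · intro hp
    have hS : Sset (x - 1) x = ∅ := by
      apply Finset.filter_eq_empty_iff.mpr
      intro q hq
      rw [hp.primeFactors] at hq
      have : q = x := by simpa using hq
      omega
    simp [phiA, hS]

-- ---------- B-side model: phi after subtracting phi(d) for divisors d ≤ n ----------
def MBset (n k : Nat) : Finset Nat := k.divisors.filter (fun d => d ≤ n ∧ 2 * d ≤ k)
def MB (n k : Nat) : Int := (k : Int) - ∑ d ∈ MBset n k, (d.totient : Int)

theorem MB_zero (k : Nat) : MB 0 k = (k : Int) := by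
  have h : MBset 0 k = ∅ := by
    apply Finset.filter_eq_empty_iff.mpr
    intro d hd
    have := (Nat.mem_divisors.mp hd).1
    have hd0 : d ≠ 0 := by
      rintro rfl
      exact (Nat.mem_divisors.mp hd).2 (Nat.eq_zero_of_zero_dvd this)
    rintro ⟨h1, -⟩; omega
  simp [MB, h]

theorem proper_iff (k d : Nat) (hd : d ∈ k.divisors) : 2 * d ≤ k ↔ d < k := by
  obtain ⟨hdvd, hk0⟩ := Nat.mem_divisors.mp hd
  have hd0 : d ≠ 0 := by rintro rfl; exact hk0 (Nat.eq_zero_of_zero_dvd hdvd)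
  constructor
  · intro h; omega
  · intro h
    obtain ⟨m, rfl⟩ := hdvd
    have hm : 2 ≤ m := by
      rcases Nat.lt_or_ge m 2 with hm | hm
      · interval_cases m <;> omega
      · exact hm
    calc 2 * d = d * 2 := by ring
    _ ≤ d * m := Nat.mul_le_mul_left d hm

theorem totient_sub_proper (k : Nat) (hk : k ≠ 0) :
    (k : Int) - ∑ d ∈ k.properDivisors, (d.totient : Int) = (k.totient : Int) := by
  have h1 : insert k k.properDivisors = k.divisors := Nat.insert_self_properDivisors hk
  have h2 : k ∉ k.properDivisors := by
    simp [Nat.mem_properDivisors]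
  have h3 : ∑ d ∈ k.divisors, (d.totient : Int) = (k.totient : Int) + ∑ d ∈ k.properDivisors, (d.totient : Int) := by
    rw [← h1, Finset.sum_insert h2]
  have h4 : ∑ d ∈ k.divisors, (d.totient : Int) = (k : Int) := by
    rw [← Nat.cast_sum]
    exact_mod_cast Nat.sum_totient k
  omega

theorem MB_self_prev (x : Nat) (hx : 1 ≤ x) : MB (x - 1) x = (x.totient : Int) := by
  have hS : MBset (x - 1) x = x.properDivisors := by
    apply Finset.ext
    intro d
    simp only [MBset, Finset.mem_filter, Nat.mem_properDivisors]
    constructor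
    · rintro ⟨hd, -, h2⟩
      exact ⟨(Nat.mem_divisors.mp hd).1, (proper_iff x d hd).mp h2⟩
    · rintro ⟨hdvd, hlt⟩
      have hd : d ∈ x.divisors := Nat.mem_divisors.mpr ⟨hdvd, by omega⟩
      exact ⟨hd, by omega, (proper_iff x d hd).mpr hlt⟩
  rw [MB, hS, totient_sub_proper x (by omega)]

theorem MB_final (n k : Nat) (hk : k ≤ n) : MB n k = (k.totient : Int) := by
  rcases Nat.eq_zero_or_pos k with rfl | hk0
  · simp [MB, MBset, Nat.divisors_zero]
  have hS : MBset n k = k.properDivisors := by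
    apply Finset.ext
    intro d
    simp only [MBset, Finset.mem_filter, Nat.mem_properDivisors]
    constructor
    · rintro ⟨hd, -, h2⟩
      exact ⟨(Nat.mem_divisors.mp hd).1, (proper_iff k d hd).mp h2⟩
    · rintro ⟨hdvd, hlt⟩
      have hd : d ∈ k.divisors := Nat.mem_divisors.mpr ⟨hdvd, by omega⟩
      have := Nat.le_of_dvd hk0 hdvd
      exact ⟨hd, by omega, (proper_iff k d hd).mpr hlt⟩
  rw [MB, hS, totient_sub_proper k (by omega)]

theorem MB_update (n k : Nat) (hdvd : (n + 1) ∣ k) (h2x : 2 * (n + 1) ≤ k) :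
    MB (n + 1) k = MB n k - (((n + 1).totient : Nat) : Int) := by
  set x := n + 1 with hxdef
  have hk0 : k ≠ 0 := by omega
  have hxmem : x ∈ k.divisors := Nat.mem_divisors.mpr ⟨hdvd, hk0⟩
  have hxnot : x ∉ MBset n k := by
    simp only [MBset, Finset.mem_filter]
    rintro ⟨-, h, -⟩; omega
  have hSins : MBset x k = insert x (MBset n k) := by
    apply Finset.ext
    intro d
    simp only [MBset, Finset.mem_filter, Finset.mem_insert]
    constructor
    · rintro ⟨h1, h2, h3⟩
      rcases Nat.lt_or_ge d x with h4 | h4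
      · exact Or.inr ⟨h1, by omega, h3⟩
      · exact Or.inl (by omega)
    · rintro (rfl | ⟨h1, h2, h3⟩)
      · exact ⟨hxmem, le_refl _, h2x⟩
      · exact ⟨h1, by omega, h3⟩
  rw [MB, hSins, Finset.sum_insert hxnot, MB]
  ring

theorem MB_stable (n k : Nat) (h : ¬((n + 1) ∣ k ∧ 2 * (n + 1) ≤ k)) : MB (n + 1) k = MB n k := by
  have hS : MBset (n + 1) k = MBset n k := by
    apply Finset.ext
    intro d
    simp only [MBset, Finset.mem_filter]
    constructor
    · rintro ⟨h1, h2, h3⟩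
      refine ⟨h1, ?_, h3⟩
      rcases Nat.lt_or_ge d (n + 1) with h4 | h4
      · omega
      · exfalso
        have hd : d = n + 1 := by omega
        exact h ⟨hd ▸ (Nat.mem_divisors.mp h1).1, hd ▸ h3⟩
    · rintro ⟨h1, h2, h3⟩; exact ⟨h1, by omega, h3⟩
  rw [MB, hS, MB]

-- ---------- cumulative sums ----------
def sumphi (j : Nat) : Int := ∑ k ∈ Finset.Ioc 1 j, (Nat.totient k : Int)

theorem sumphi_zero : sumphi 0 = 0 := by simp [sumphi]
theorem sumphi_one : sumphi 1 = 0 := by simp [sumphi]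
theorem sumphi_succ (N : Nat) (h : 1 ≤ N) : sumphi (N + 1) = sumphi N + (((N + 1).totient : Nat) : Int) := by
  rw [sumphi, sumphi, Finset.sum_Ioc_succ_top h]

-- ---------- the lists both sieves produce ----------
def MLA (limit : Int) (n : Nat) : List Int :=
  (List.range (limit + 1).toNat).map (fun k => ((phiA n k : Nat) : Int))
def MLB (limit : Int) (n : Nat) : List Int :=
  (List.range (limit + 1).toNat).map (fun k => MB n k)
def phiTarget (limit : Int) : List Int :=
  (List.range (limit + 1).toNat).map (fun k => ((Nat.totient k : Nat) : Int))
def fareyTarget (limit : Int) : List Int :=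
  (List.range (limit + 1).toNat).map (fun j => sumphi j)

theorem init_eq_MLA (limit : Int) : PySem.List.pyRange 0 (limit + 1) 1 = MLA limit 1 := by
  rw [PySem.List.pyRange_one, MLA]
  simp only [sub_zero]
  apply List.map_congr_left
  intro k hk
  rw [phiA_one]
  omega

theorem init_eq_MLB (limit : Int) : PySem.List.pyRange 0 (limit + 1) 1 = MLB limit 0 := by
  rw [PySem.List.pyRange_one, MLB]
  simp only [sub_zero]
  apply List.map_congr_left
  intro k hk
  rw [MB_zero]
  omega

-- ---------- A: one outer step ----------
theorem sieveStepA_eq (limit : Int) (n : Nat) (hn : 1 ≤ n) (hle : (n : Int) + 1 ≤ limit) :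
    sieveStepA limit (MLA limit n) ((n : Int) + 1) = MLA limit (n + 1) := by
  have hlim0 : 0 ≤ limit := by omega
  have hxN : n + 1 < (limit + 1).toNat := by omega
  have hcast : ((n : Int) + 1) = (((n + 1 : Nat)) : Int) := by push_cast; ring
  have hlenA : (MLA limit n).length = (limit + 1).toNat := by
    rw [MLA, List.length_map, List.length_range]
  have hread : PySem.List.pyGetD (MLA limit n) ((n : Int) + 1) 0
      = ((phiA n (n + 1) : Nat) : Int) := by
    rw [hcast, PySem.List.pyGetD_natCast, MLA, PySem.List.getD_map_range _ _ _ _ hxN]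
  have htest : ((PySem.List.pyGetD (MLA limit n) ((n : Int) + 1) 0 == (n : Int) + 1)) = true
      ↔ (n + 1).Prime := by
    rw [hread, hcast, beq_iff_eq, Nat.cast_inj]
    have h1 : (n + 1) - 1 = n := by omega
    have h2 := phiA_prime_test (n + 1) (by omega)
    rw [h1] at h2
    exact h2
  have hxpos : (0 : Int) < (n : Int) + 1 := by positivity
  rw [sieveStepA]
  by_cases hprime : (n + 1).Prime
  · rw [if_pos (htest.mpr hprime)]
    refine Eq.trans (foldl_pySetD_spec
      (fun v => v - PySem.Int.floordiv v ((n : Int) + 1))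
      (PySem.List.pyRange ((n : Int) + 1) (limit + 1) ((n : Int) + 1)) (MLA limit n)
      (nodup_pyRange_pos _ _ _ hxpos) (by
        intro k hk
        obtain ⟨h1, h2, h3⟩ := (PySem.List.mem_pyRange_iff_of_pos hxpos k).mp hk
        rw [hlenA]
        constructor <;> omega)) ?_
    rw [hlenA]
    conv_rhs => rw [MLA]
    apply List.map_congr_left
    intro j hj
    have hjN : j < (limit + 1).toNat := List.mem_range.mp hj
    have hgetj : (MLA limit n).getD j 0 = ((phiA n j : Nat) : Int) := by
      rw [MLA, PySem.List.getD_map_range _ _ _ _ hjN]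
    by_cases hmem : ((j : Int) ∈ PySem.List.pyRange ((n : Int) + 1) (limit + 1) ((n : Int) + 1))
    · rw [if_pos hmem, hgetj]
      obtain ⟨h1, h2, h3⟩ := (PySem.List.mem_pyRange_iff_of_pos hxpos (j : Int)).mp hmem
      have hdvd : (n + 1) ∣ j := by
        have hdj : ((n : Int) + 1) ∣ (j : Int) := by
          have h4 := dvd_add h3 (dvd_refl ((n : Int) + 1))
          simpa using h4
        rw [hcast] at hdj
        exact_mod_cast hdj
      have hj0 : j ≠ 0 := by omega
      have hstep := phiA_step n j hprime hdvd hj0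
      have hdle : phiA n j / (n + 1) ≤ phiA n j := Nat.div_le_self _ _
      show ((phiA n j : Nat) : Int)
          - PySem.Int.floordiv ((phiA n j : Nat) : Int) ((n : Int) + 1) = _
      rw [hcast, PySem.Int.floordiv_natCast]
      omega
    · rw [if_neg hmem, hgetj]
      have hnot : (n + 1) ∉ j.primeFactors := by
        intro hmem2
        obtain ⟨-, hdvd, hj0⟩ := Nat.mem_primeFactors.mp hmem2
        have hxj : n + 1 ≤ j := Nat.le_of_dvd (by omega) hdvd
        apply hmem
        rw [PySem.List.mem_pyRange_iff_of_pos hxpos]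
        refine ⟨by omega, by omega, ?_⟩
        have h5 : ((n : Int) + 1) ∣ (j : Int) := by
          rw [hcast]; exact_mod_cast hdvd
        exact dvd_sub h5 (dvd_refl _)
      exact_mod_cast congrArg (fun (t : Nat) => (t : Int)) (phiA_stable n j hnot).symm
  · rw [if_neg (by intro hc; exact hprime (htest.mp hc)), MLA, MLA]
    apply List.map_congr_left
    intro j hj
    have hnot : (n + 1) ∉ j.primeFactors := fun hmem2 =>
      hprime (Nat.prime_of_mem_primeFactors hmem2)
    exact_mod_cast congrArg (fun (t : Nat) => (t : Int)) (phiA_stable n j hnot).symm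

-- ---------- B: one outer step ----------
theorem sieveStepB_eq (limit : Int) (n : Nat) (hle : (n : Int) + 1 ≤ limit) :
    sieveStepB limit (MLB limit n) ((n : Int) + 1) = MLB limit (n + 1) := by
  have hlim0 : 0 ≤ limit := by omega
  have hxN : n + 1 < (limit + 1).toNat := by omega
  have hcast : ((n : Int) + 1) = (((n + 1 : Nat)) : Int) := by push_cast; ring
  have hlenB : (MLB limit n).length = (limit + 1).toNat := by
    rw [MLB, List.length_map, List.length_range]
  have hxpos : (0 : Int) < (n : Int) + 1 := by positivity
  have hread : PySem.List.pyGetD (MLB limit n) ((n : Int) + 1) 0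
      = (((n + 1).totient : Nat) : Int) := by
    rw [hcast, PySem.List.pyGetD_natCast, MLB, PySem.List.getD_map_range _ _ _ _ hxN]
    have h1 : (n + 1) - 1 = n := by omega
    have h2 := MB_self_prev (n + 1) (by omega)
    rw [h1] at h2
    exact h2
  rw [sieveStepB, hread]
  refine Eq.trans (foldl_pySetD_spec
    (fun v => v - (((n + 1).totient : Nat) : Int))
    (PySem.List.pyRange (2 * ((n : Int) + 1)) (limit + 1) ((n : Int) + 1)) (MLB limit n)
    (nodup_pyRange_pos _ _ _ hxpos) (by
      intro k hk
      obtain ⟨h1, h2, h3⟩ := (PySem.List.mem_pyRange_iff_of_pos hxpos k).mp hk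
      rw [hlenB]
      constructor <;> omega)) ?_
  rw [hlenB]
  conv_rhs => rw [MLB]
  apply List.map_congr_left
  intro j hj
  have hjN : j < (limit + 1).toNat := List.mem_range.mp hj
  have hgetj : (MLB limit n).getD j 0 = MB n j := by
    rw [MLB, PySem.List.getD_map_range _ _ _ _ hjN]
  by_cases hmem : ((j : Int) ∈ PySem.List.pyRange (2 * ((n : Int) + 1)) (limit + 1) ((n : Int) + 1))
  · rw [if_pos hmem, hgetj]
    obtain ⟨h1, h2, h3⟩ := (PySem.List.mem_pyRange_iff_of_pos hxpos (j : Int)).mp hmem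
    have hdvd : (n + 1) ∣ j := by
      have hdj : ((n : Int) + 1) ∣ (j : Int) := by
        have h4 := dvd_add h3 (dvd_mul_left ((n : Int) + 1) 2)
        simpa using h4
      rw [hcast] at hdj
      exact_mod_cast hdj
    have h2j : 2 * (n + 1) ≤ j := by omega
    exact (MB_update n j hdvd h2j).symm
  · rw [if_neg hmem, hgetj]
    refine (MB_stable n j ?_).symm
    rintro ⟨hdvd, h2j⟩
    apply hmem
    rw [PySem.List.mem_pyRange_iff_of_pos hxpos]
    refine ⟨by omega, by omega, ?_⟩
    have h5 : ((n : Int) + 1) ∣ (j : Int) := by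
      rw [hcast]; exact_mod_cast hdvd
    exact dvd_sub h5 (dvd_mul_left ((n : Int) + 1) 2)

-- ---------- A: whole sieve ----------
theorem sieveA_partial (limit : Int) :
    ∀ (j : Nat), (j : Int) + 2 ≤ limit + 1 →
      (PySem.List.pyRange 2 ((j : Int) + 2) 1).foldl (sieveStepA limit)
        (PySem.List.pyRange 0 (limit + 1) 1) = MLA limit (1 + j) := by
  intro j
  induction j with
  | zero =>
      intro _
      have h0 : (((0 : Nat) : Int) + 2) = 2 := by norm_num
      rw [h0, show PySem.List.pyRange 2 2 1 = ([] : List Int) from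
        PySem.List.pyRange_one_eq_nil (by omega), List.foldl_nil]
      exact init_eq_MLA limit
  | succ j ih =>
      intro hle
      have hle' : (j : Int) + 2 ≤ limit + 1 := by push_cast at hle; omega
      have hsplit : (((j + 1 : Nat)) : Int) + 2 = ((j : Int) + 2) + 1 := by push_cast; ring
      rw [hsplit, show PySem.List.pyRange 2 (((j : Int) + 2) + 1) 1
          = PySem.List.pyRange 2 ((j : Int) + 2) 1 ++ [(j : Int) + 2] from
        PySem.List.pyRange_one_succ_right (by omega), List.foldl_append,
        ih hle', List.foldl_cons, List.foldl_nil]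
      have hc : ((j : Int) + 2) = (((1 + j : Nat)) : Int) + 1 := by push_cast; ring
      rw [hc, sieveStepA_eq limit (1 + j) (by omega) (by push_cast at hle ⊢; omega)]
      have h3 : 1 + j + 1 = 1 + (j + 1) := by omega
      rw [h3]

theorem sieveA_eq (limit : Int) :
    (PySem.List.pyRange 2 (limit + 1) 1).foldl (sieveStepA limit)
      (PySem.List.pyRange 0 (limit + 1) 1) = phiTarget limit := by
  by_cases hl : 2 ≤ limit
  · have hj : ((limit - 1).toNat : Int) + 2 = limit + 1 := by omega
    have h := sieveA_partial limit (limit - 1).toNat (by omega)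
    rw [hj] at h
    rw [h, MLA, phiTarget]
    apply List.map_congr_left
    intro k hk
    have hkN : k < (limit + 1).toNat := List.mem_range.mp hk
    congr 1
    apply phiA_final
    intro p hp
    obtain ⟨-, hdvd, hk0⟩ := Nat.mem_primeFactors.mp hp
    have := Nat.le_of_dvd (by omega) hdvd
    omega
  · rw [show PySem.List.pyRange 2 (limit + 1) 1 = ([] : List Int) from
      PySem.List.pyRange_one_eq_nil (by omega), List.foldl_nil, init_eq_MLA, MLA, phiTarget]
    apply List.map_congr_left
    intro k hk
    have hkN : k < (limit + 1).toNat := List.mem_range.mp hk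
    have hk1 : k = 0 ∨ k = 1 := by omega
    rcases hk1 with rfl | rfl <;> simp [phiA_one]

-- ---------- B: whole sieve ----------
theorem sieveB_partial (limit : Int) :
    ∀ (j : Nat), (j : Int) + 1 ≤ limit + 1 →
      (PySem.List.pyRange 1 ((j : Int) + 1) 1).foldl (sieveStepB limit)
        (PySem.List.pyRange 0 (limit + 1) 1) = MLB limit j := by
  intro j
  induction j with
  | zero =>
      intro _
      have h0 : (((0 : Nat) : Int) + 1) = 1 := by norm_num
      rw [h0, show PySem.List.pyRange 1 1 1 = ([] : List Int) from
        PySem.List.pyRange_one_eq_nil (by omega), List.foldl_nil]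
      exact init_eq_MLB limit
  | succ j ih =>
      intro hle
      have hle' : (j : Int) + 1 ≤ limit + 1 := by push_cast at hle; omega
      have hsplit : (((j + 1 : Nat)) : Int) + 1 = ((j : Int) + 1) + 1 := by push_cast; ring
      rw [hsplit, show PySem.List.pyRange 1 (((j : Int) + 1) + 1) 1
          = PySem.List.pyRange 1 ((j : Int) + 1) 1 ++ [(j : Int) + 1] from
        PySem.List.pyRange_one_succ_right (by omega), List.foldl_append,
        ih hle', List.foldl_cons, List.foldl_nil]
      exact sieveStepB_eq limit j (by push_cast at hle ⊢; omega)

theorem sieveB_eq (limit : Int) :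
    (PySem.List.pyRange 1 (limit + 1) 1).foldl (sieveStepB limit)
      (PySem.List.pyRange 0 (limit + 1) 1) = phiTarget limit := by
  by_cases hl : 1 ≤ limit
  · have hj : (limit.toNat : Int) + 1 = limit + 1 := by omega
    have h := sieveB_partial limit limit.toNat (by omega)
    rw [hj] at h
    rw [h, MLB, phiTarget]
    apply List.map_congr_left
    intro k hk
    have hkN : k < (limit + 1).toNat := List.mem_range.mp hk
    exact MB_final limit.toNat k (by omega)
  · rw [show PySem.List.pyRange 1 (limit + 1) 1 = ([] : List Int) from
      PySem.List.pyRange_one_eq_nil (by omega), List.foldl_nil, init_eq_MLB, MLB, phiTarget]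
    apply List.map_congr_left
    intro k hk
    have hkN : k < (limit + 1).toNat := List.mem_range.mp hk
    have hk0 : k = 0 := by omega
    subst hk0
    rw [MB_final 0 0 (le_refl _)]

-- ---------- A: counts stage ----------
def CLA (limit : Int) (c : Nat) : List Int :=
  (List.range (limit + 1).toNat).map (fun j => if j ≤ c then sumphi j else 0)

theorem counts0_eq_CLA (limit : Int) : List.replicate (limit + 1).toNat (0 : Int) = CLA limit 1 := by
  apply List.ext_getElem (by simp [CLA])
  intro i h1 h2
  simp only [List.getElem_replicate, CLA, List.getElem_map, List.getElem_range]
  by_cases hi : i ≤ 1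
  · have h3 : i = 0 ∨ i = 1 := by omega
    rcases h3 with rfl | rfl <;> simp [sumphi_zero, sumphi_one]
  · simp [hi]

theorem countStepA_eq (limit : Int) (x : Nat) (hx2 : 2 ≤ x) (hxle : (x : Int) ≤ limit) :
    countStepA (phiTarget limit) (CLA limit (x - 1)) (x : Int) = CLA limit x := by
  have hlim0 : 0 ≤ limit := by omega
  have hxN : x < (limit + 1).toNat := by omega
  have hx1N : x - 1 < (limit + 1).toNat := by omega
  have hcast : ((x : Nat) : Int) - 1 = (((x - 1 : Nat)) : Int) := by omega
  have hr1 : PySem.List.pyGetD (CLA limit (x - 1)) (((x : Nat) : Int) - 1) 0 = sumphi (x - 1) := by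
    rw [hcast, PySem.List.pyGetD_natCast, CLA, PySem.List.getD_map_range _ _ _ _ hx1N,
      if_pos (le_refl _)]
  have hr2 : PySem.List.pyGetD (phiTarget limit) ((x : Nat) : Int) 0
      = ((x.totient : Nat) : Int) := by
    rw [PySem.List.pyGetD_natCast, phiTarget, PySem.List.getD_map_range _ _ _ _ hxN]
  have hsum : sumphi (x - 1) + ((x.totient : Nat) : Int) = sumphi x := by
    have h := sumphi_succ (x - 1) (by omega)
    have hx' : x - 1 + 1 = x := by omega
    rw [hx'] at h
    omega
  rw [countStepA, hr1, hr2, hsum, CLA,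
    PySem.List.pySetD_of_nonneg _ _ (by omega : (0 : Int) ≤ ((x : Nat) : Int))]
  have htn : ((x : Nat) : Int).toNat = x := by omega
  rw [htn, set_map_range (sumphi x) hxN, CLA]
  apply List.map_congr_left
  intro j hj
  by_cases hjx : j = x
  · simp [hjx]
  · rw [if_neg hjx]
    by_cases hj1 : j ≤ x - 1
    · rw [if_pos hj1, if_pos (by omega)]
    · rw [if_neg hj1, if_neg (by omega)]

theorem countsA_partial (limit : Int) :
    ∀ (j : Nat), (j : Int) + 2 ≤ limit + 1 →
      (PySem.List.pyRange 2 ((j : Int) + 2) 1).foldl (countStepA (phiTarget limit))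
        (List.replicate (limit + 1).toNat 0) = CLA limit (1 + j) := by
  intro j
  induction j with
  | zero =>
      intro _
      have h0 : (((0 : Nat) : Int) + 2) = 2 := by norm_num
      rw [h0, show PySem.List.pyRange 2 2 1 = ([] : List Int) from
        PySem.List.pyRange_one_eq_nil (by omega), List.foldl_nil]
      exact counts0_eq_CLA limit
  | succ j ih =>
      intro hle
      have hle' : (j : Int) + 2 ≤ limit + 1 := by push_cast at hle; omega
      have hsplit : (((j + 1 : Nat)) : Int) + 2 = ((j : Int) + 2) + 1 := by push_cast; ring
      rw [hsplit, show PySem.List.pyRange 2 (((j : Int) + 2) + 1) 1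
          = PySem.List.pyRange 2 ((j : Int) + 2) 1 ++ [(j : Int) + 2] from
        PySem.List.pyRange_one_succ_right (by omega), List.foldl_append,
        ih hle', List.foldl_cons, List.foldl_nil]
      have hc : ((j : Int) + 2) = (((1 + (j + 1) : Nat)) : Int) := by push_cast; ring
      have hc2 : 1 + (j + 1) - 1 = 1 + j := by omega
      rw [hc, ← hc2, countStepA_eq limit (1 + (j + 1)) (by omega) (by push_cast at hle ⊢; omega)]

theorem countsA_eq (limit : Int) :
    (PySem.List.pyRange 2 (limit + 1) 1).foldl (countStepA (phiTarget limit))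
      (List.replicate (limit + 1).toNat 0) = fareyTarget limit := by
  by_cases hl : 2 ≤ limit
  · have hj : ((limit - 1).toNat : Int) + 2 = limit + 1 := by omega
    have h := countsA_partial limit (limit - 1).toNat (by omega)
    rw [hj] at h
    rw [h, CLA, fareyTarget]
    apply List.map_congr_left
    intro j hjm
    have hjN : j < (limit + 1).toNat := List.mem_range.mp hjm
    rw [if_pos (by omega)]
  · rw [show PySem.List.pyRange 2 (limit + 1) 1 = ([] : List Int) from
      PySem.List.pyRange_one_eq_nil (by omega), List.foldl_nil, counts0_eq_CLA, CLA, fareyTarget]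
    apply List.map_congr_left
    intro j hjm
    have hjN : j < (limit + 1).toNat := List.mem_range.mp hjm
    rw [if_pos (by omega)]

-- ---------- B: counts stage ----------
theorem accB_core : ∀ (M : Nat),
    ((List.range M).map (fun (k : Nat) => ((k : Int), ((Nat.totient k : Nat) : Int)))).foldl accStepB
      ((0 : Int), ([] : List Int))
    = (sumphi (M - 1), (List.range M).map (fun j => sumphi j)) := by
  intro M
  induction M with
  | zero => simp [sumphi_zero]
  | succ M ih =>
      have hacc : (if (1 : Int) < (M : Int) then sumphi (M - 1) + ((M.totient : Nat) : Int)
          else sumphi (M - 1)) = sumphi M := by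
        by_cases hM : 2 ≤ M
        · rw [if_pos (by exact_mod_cast hM)]
          have h := sumphi_succ (M - 1) (by omega)
          have hM' : M - 1 + 1 = M := by omega
          rw [hM'] at h
          omega
        · rw [if_neg (by
            intro hc
            have h2 : (2 : Int) ≤ (M : Int) := hc
            have : 2 ≤ M := by exact_mod_cast h2
            omega)]
          have h3 : M = 0 ∨ M = 1 := by omega
          rcases h3 with rfl | rfl <;> simp [sumphi_zero, sumphi_one]
      rw [List.range_succ, List.map_append, List.foldl_append, ih]
      simp only [List.map_cons, List.map_nil, List.foldl_cons, List.foldl_nil, accStepB]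
      rw [hacc, List.map_append]
      simp

theorem countsB_eq (limit : Int) :
    ((PySem.List.enumerate (phiTarget limit) 0).foldl accStepB ((0 : Int), ([] : List Int))).2
      = fareyTarget limit := by
  have hlen : (phiTarget limit).length = (limit + 1).toNat := by
    rw [phiTarget, List.length_map, List.length_range]
  have henum : PySem.List.enumerate (phiTarget limit) 0
      = (List.range (limit + 1).toNat).map
          (fun (k : Nat) => ((k : Int), ((Nat.totient k : Nat) : Int))) := by
    rw [PySem.List.enumerate_eq_map_pyRange (phiTarget limit) 0]
    rw [show PySem.List.len (phiTarget limit) = (((limit + 1).toNat : Nat) : Int) from by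
      rw [PySem.List.len_eq, hlen]]
    rw [PySem.List.pyRange_zero_nat]
    rw [List.map_map]
    apply List.map_congr_left
    intro k hk
    have hkN : k < (limit + 1).toNat := List.mem_range.mp hk
    simp only [Function.comp_apply]
    rw [PySem.List.pyGetD_natCast, phiTarget, PySem.List.getD_map_range _ _ _ _ hkN]
  rw [henum, accB_core, fareyTarget]

-- ===== VERDICT (by name: the statement is the Claim_ definition above) =====
theorem generate_all_farey_lengths_spec : Claim_equal_generate_all_farey_lengths := by
  intro limit _
  unfold Spec_generate_all_farey_lengths
  show (PySem.List.pyRange 2 (limit + 1) 1).foldl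
      (countStepA ((PySem.List.pyRange 2 (limit + 1) 1).foldl (sieveStepA limit)
        (PySem.List.pyRange 0 (limit + 1) 1)))
      (List.replicate (limit + 1).toNat 0)
    = ((PySem.List.enumerate ((PySem.List.pyRange 1 (limit + 1) 1).foldl (sieveStepB limit)
        (PySem.List.pyRange 0 (limit + 1) 1)) 0).foldl accStepB ((0 : Int), ([] : List Int))).2
  rw [sieveA_eq, sieveB_eq, countsA_eq, countsB_eq]
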